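-- pv_equiv track=rewrite | github.com/crashorbo/sisnotario | tramite/templatetags/tramite_tags.py | tramitantes
-- ===== SOURCE A (Python) =====
-- def tramitantes(fi,nf,te):
--   resultado = []
--   i = 0
--   j = 0
--   k = 0
--   while ((i < len(fi)) or (j < len(nf)) or (k < len(te))):
--     l = 0
--     fir = []
--     nfr = []
--     tes = []
--     while l < 4:
--       if i < len(fi):
--         fir.append(fi[i])
--       else:
--         fir.append(None)
--       l = l + 1
--       i = i + 1
--     l = 0
--     while l < 2:
--       if j < len(nf):
--         nfr.append(nf[j])
--       else:
--         nfr.append(None)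
--       l = l + 1
--       j = j + 1
--     l = 0
--     while l < 2:
--       if k < len(te):
--         tes.append(te[k])
--       else:
--         tes.append(None)
--       l = l + 1
--       k = k + 1
--     resaux = [fir, nfr, tes]
--     resultado.append(resaux)
--   return resultado
-- ===== SOURCE B (Python) =====
-- def tramitantes(fi, nf, te):
--     def pad(seq, w):
--         return (seq + [None] * w)[:w]
--     n = max((len(fi) + 3) // 4, (len(nf) + 1) // 2, (len(te) + 1) // 2)
--     return [[pad(fi[4 * r:4 * r + 4], 4),
--              pad(nf[2 * r:2 * r + 2], 2),
--              pad(te[2 * r:2 * r + 2], 2)] for r in range(n)]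
-- ===== Notes on version B (the rewrite author's own statement) =====
-- stated objective: simpler
-- what changed: Replaced the three running cursors with inner counting while-loops by a closed-form row count n = max of three ceilings and a per-row slice-and-pad comprehension.
import Mathlib
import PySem

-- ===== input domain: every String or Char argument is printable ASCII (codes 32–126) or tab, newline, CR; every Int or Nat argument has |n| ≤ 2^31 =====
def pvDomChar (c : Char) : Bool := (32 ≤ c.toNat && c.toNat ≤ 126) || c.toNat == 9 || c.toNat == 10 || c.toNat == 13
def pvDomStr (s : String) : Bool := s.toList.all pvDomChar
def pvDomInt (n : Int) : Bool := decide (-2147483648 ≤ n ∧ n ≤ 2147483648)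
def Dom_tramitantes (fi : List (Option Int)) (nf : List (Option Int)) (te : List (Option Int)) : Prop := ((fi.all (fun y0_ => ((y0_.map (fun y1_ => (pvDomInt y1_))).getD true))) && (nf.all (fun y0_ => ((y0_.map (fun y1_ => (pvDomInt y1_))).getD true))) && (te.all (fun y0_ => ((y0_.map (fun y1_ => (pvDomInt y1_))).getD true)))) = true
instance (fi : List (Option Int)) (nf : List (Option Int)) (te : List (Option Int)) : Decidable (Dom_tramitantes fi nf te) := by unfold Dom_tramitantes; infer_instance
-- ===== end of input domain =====

-- B replaces A's three running cursors and inner counting loops by a closed-form row count and per-row slice-and-pad (objective: simpler).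

-- ===== PORT A =====
-- inner 'while l < w' loop of A: append xs[idx] if idx in range else None, w times
def pvGrab (xs : List (Option Int)) (idx : Nat) (w : Nat) : List (Option Int) :=
  match w with
  | 0 => []
  | Nat.succ w' => (if idx < xs.length then xs.getD idx none else none) :: pvGrab xs (idx + 1) w'

-- outer 'while (i < len fi) or (j < len nf) or (k < len te)' loop of A;
-- 'fuel' is only a totality guard: it never runs out (each iteration consumes
-- at least one element of fi, nf or te, and fuel starts at their total length)
def pvLoopA (fuel : Nat) (fi nf te : List (Option Int)) (i j k : Nat)
    (acc : List (List (List (Option Int)))) : List (List (List (Option Int))) :=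
  match fuel with
  | 0 => acc
  | Nat.succ fuel' =>
    if i < fi.length ∨ j < nf.length ∨ k < te.length then
      pvLoopA fuel' fi nf te (i + 4) (j + 2) (k + 2)
        (acc ++ [[pvGrab fi i 4, pvGrab nf j 2, pvGrab te k 2]])
    else acc

def tramitantes (fi : List (Option Int)) (nf : List (Option Int)) (te : List (Option Int)) : List (List (List (Option Int))) :=
  pvLoopA (fi.length + nf.length + te.length) fi nf te 0 0 0 []

-- ===== PORT B =====
-- pad(seq, w) = (seq + [None]*w)[:w]
def pvPad (seq : List (Option Int)) (w : Nat) : List (Option Int) :=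
  (seq ++ List.replicate w none).take w

def tramitantes_alt (fi : List (Option Int)) (nf : List (Option Int)) (te : List (Option Int)) : List (List (List (Option Int))) :=
  let n := max ((fi.length + 3) / 4) (max ((nf.length + 1) / 2) ((te.length + 1) / 2))
  (List.range n).map (fun r =>
    [pvPad ((fi.drop (4 * r)).take 4) 4,
     pvPad ((nf.drop (2 * r)).take 2) 2,
     pvPad ((te.drop (2 * r)).take 2) 2])

-- ===== PRECONDITION & SPEC =====
def Spec_tramitantes (fi : List (Option Int)) (nf : List (Option Int)) (te : List (Option Int)) (out : List (List (List (Option Int)))) : Prop := out = tramitantes_alt fi nf te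
instance (fi : List (Option Int)) (nf : List (Option Int)) (te : List (Option Int)) (out : List (List (List (Option Int)))) : Decidable (Spec_tramitantes fi nf te out) := by unfold Spec_tramitantes; infer_instance

-- ===== CLAIM (what is proved, stated in full; the proofs are below) =====
def Claim_equal_tramitantes : Prop := ∀ (fi : List (Option Int)) (nf : List (Option Int)) (te : List (Option Int)), Dom_tramitantes fi nf te → Spec_tramitantes fi nf te (tramitantes fi nf te)

-- ===== LEMMAS AND PROOFS =====

-- take w of list-plus-padding only depends on padding length up to w
lemma pvTake_append_replicate (l : List (Option Int)) (w k1 k2 : Nat)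
    (h1 : w ≤ k1) (h2 : w ≤ k2) :
    (l ++ List.replicate k1 (none : Option Int)).take w
      = (l ++ List.replicate k2 (none : Option Int)).take w := by
  simp only [List.take_append, List.take_replicate]
  congr 2
  omega

-- A's inner counting loop produces exactly B's padded slice
lemma pvGrab_eq_pad (xs : List (Option Int)) : ∀ (w idx : Nat),
    pvGrab xs idx w = pvPad ((xs.drop idx).take w) w := by
  intro w
  induction w with
  | zero => intro idx; simp [pvGrab, pvPad]
  | succ w' ih =>
    intro idx
    by_cases h : idx < xs.length
    · obtain ⟨a, t, ht⟩ : ∃ a t, xs.drop idx = a :: t := by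
        rcases hd : xs.drop idx with _ | ⟨a, t⟩
        · exfalso; have := congrArg List.length hd; simp at this; omega
        · exact ⟨a, t, rfl⟩
      have ha : xs.getD idx none = a := by
        have h0 : (xs.drop idx)[0]'(by simp [ht]) = a := by simp [ht]
        rw [List.getD_eq_getElem _ _ h]
        simpa using h0
      have hdrop : xs.drop (idx + 1) = t := by
        have := congrArg List.tail ht
        simpa [List.tail_drop] using this
      rw [pvGrab, if_pos h, ha, ih, hdrop, ht, List.take_succ_cons]
      show a :: (List.take w' t ++ List.replicate w' none).take w'
          = ((a :: List.take w' t) ++ List.replicate (w' + 1) none).take (w' + 1)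
      rw [List.cons_append, List.take_succ_cons,
        pvTake_append_replicate _ w' w' (w' + 1) (le_refl _) (by omega)]
    · have hd : xs.drop idx = [] := by
        apply List.drop_eq_nil_of_le; omega
      have hd' : xs.drop (idx + 1) = [] := by
        apply List.drop_eq_nil_of_le; omega
      simp [pvGrab, h, hd, hd', ih (idx + 1), pvPad, List.replicate_succ]

-- the row built at step r, in B's form
def pvRow (fi nf te : List (Option Int)) (r : Nat) : List (List (Option Int)) :=
  [pvPad ((fi.drop (4 * r)).take 4) 4,
   pvPad ((nf.drop (2 * r)).take 2) 2,
   pvPad ((te.drop (2 * r)).take 2) 2]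

def pvN (fi nf te : List (Option Int)) : Nat :=
  max ((fi.length + 3) / 4) (max ((nf.length + 1) / 2) ((te.length + 1) / 2))

lemma pvCond_iff (fi nf te : List (Option Int)) (r : Nat) :
    (4 * r < fi.length ∨ 2 * r < nf.length ∨ 2 * r < te.length) ↔ r < pvN fi nf te := by
  unfold pvN; omega

lemma pvLoopA_eq (fi nf te : List (Option Int)) : ∀ (fuel r : Nat), pvN fi nf te - r ≤ fuel →
    ∀ acc, pvLoopA fuel fi nf te (4 * r) (2 * r) (2 * r) acc
      = acc ++ (List.range' r (pvN fi nf te - r)).map (pvRow fi nf te) := by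
  intro fuel
  induction fuel with
  | zero =>
    intro r hm acc
    have h0 : pvN fi nf te - r = 0 := by omega
    rw [pvLoopA, h0]
    simp
  | succ fuel' ih =>
    intro r hm acc
    by_cases hlt : r < pvN fi nf te
    · have hcond : (4 * r < fi.length ∨ 2 * r < nf.length ∨ 2 * r < te.length) := by
        rw [pvCond_iff]; omega
      rw [pvLoopA]
      simp only [hcond, if_pos]
      have h4 : 4 * r + 4 = 4 * (r + 1) := by ring
      have h2 : 2 * r + 2 = 2 * (r + 1) := by ring
      rw [h4, h2, ih (r + 1) (by omega)]
      have hn : pvN fi nf te - r = (pvN fi nf te - (r + 1)) + 1 := by omega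
      rw [hn, List.range'_succ]
      simp [pvRow, pvGrab_eq_pad, List.append_assoc]
    · have hcond : ¬ (4 * r < fi.length ∨ 2 * r < nf.length ∨ 2 * r < te.length) := by
        rw [pvCond_iff]; omega
      have h0 : pvN fi nf te - r = 0 := by omega
      rw [pvLoopA, h0]
      simp [hcond]

-- ===== VERDICT (by name: the statement is the Claim_ definition above) =====
theorem tramitantes_spec : Claim_equal_tramitantes := by
  intro fi nf te _
  unfold Spec_tramitantes tramitantes
  have hfuel : pvN fi nf te - 0 ≤ fi.length + nf.length + te.length := by
    unfold pvN; omega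
  have h := pvLoopA_eq fi nf te (fi.length + nf.length + te.length) 0 hfuel []
  simp only [Nat.mul_zero, Nat.sub_zero] at h
  rw [h]
  simp only [tramitantes_alt]
  rw [List.range_eq_range']
  rfl
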